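-- pv_equiv track=rewrite | github.com/patrickleungwl/code_lab | aoc/2018/02/sol1.py | has_frequency_counts
-- ===== SOURCE A (Python) =====
-- def has_frequency_counts(input,num_occurance):
--     occurances = {}
--     for i in range(0,len(input)):
--         var = input[i]
--         num_appeared = 0
--         if var in occurances:
--             num_appeared = occurances[var]
--         occurances[var] = num_appeared + 1
--
--     # which letter occurs exactly num_occurance times?
--     for v in occurances.values():
--         if v == num_occurance:
--             return 1
--     return 0
-- ===== SOURCE B (Python) =====
-- def has_frequency_counts(input, num_occurance):
--     chars = sorted(input)
--     n = len(chars)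
--     i = 0
--     while i < n:
--         j = i + 1
--         while j < n and chars[j] == chars[i]:
--             j += 1
--         if j - i == num_occurance:
--             return 1
--         i = j
--     return 0
-- ===== Notes on version B (the rewrite author's own statement) =====
-- stated objective: alternative
-- what changed: Replaces the frequency dict and the scan over its values by sort-then-run-length: B sorts the characters and does one left-to-right pass over maximal runs of equal characters, returning 1 as soon as a run of length num_occurance completes.
import Mathlib
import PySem

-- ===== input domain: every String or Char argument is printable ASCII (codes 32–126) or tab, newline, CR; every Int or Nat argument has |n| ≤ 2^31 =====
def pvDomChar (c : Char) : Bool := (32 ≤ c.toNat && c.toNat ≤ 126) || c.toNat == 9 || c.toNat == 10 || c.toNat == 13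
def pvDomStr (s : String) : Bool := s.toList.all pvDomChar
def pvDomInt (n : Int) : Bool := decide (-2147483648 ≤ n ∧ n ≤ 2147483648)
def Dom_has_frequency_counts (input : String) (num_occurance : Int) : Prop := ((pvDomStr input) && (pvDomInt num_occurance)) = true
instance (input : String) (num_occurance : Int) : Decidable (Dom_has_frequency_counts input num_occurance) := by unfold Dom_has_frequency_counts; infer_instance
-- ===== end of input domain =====

-- B replaces A's frequency dict + scan over its values by sort-then-run-length (one pass over runs of the sorted characters); equal return value proved for all inputs.

-- ===== PORT A =====
-- body of A's first loop: var = input[i]; num_appeared = occurances[var] if present else 0; occurances[var] = num_appeared + 1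
def pvStep (d : PySem.Dict Char Int) (var : Char) : PySem.Dict Char Int :=
  let num_appeared : Int := if d.contains var then d.getD var 0 else 0
  d.insert var (num_appeared + 1)

def has_frequency_counts (input : String) (num_occurance : Int) : Int :=
  let chars := input.toList
  let occurances :=
    (PySem.List.pyRange 0 (chars.length : Int) 1).foldl
      (fun d i => pvStep d (PySem.List.pyGetD chars i ' '))   -- i is always in range here
      PySem.Dict.empty
  -- for v in occurances.values(): if v == num_occurance: return 1 / return 0
  if occurances.values.any (fun v => v == num_occurance) then 1 else 0

-- ===== PORT B =====
-- outer while loop of Source B: each step consumes one maximal run of equal characters (j - i = 1 + length of the equal stretch after position i)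
def pvRunScan (num_occurance : Int) : List Char → Int
  | [] => 0
  | c :: rest =>
    if ((1 + (rest.takeWhile (· == c)).length : Nat) : Int) = num_occurance then 1
    else pvRunScan num_occurance (rest.dropWhile (· == c))
termination_by l => l.length
decreasing_by
  simpa using Nat.lt_succ_of_le (List.length_dropWhile_le _ _)

def has_frequency_counts_alt (input : String) (num_occurance : Int) : Int :=
  pvRunScan num_occurance (PySem.List.sorted input.toList (fun x => x) false)

-- ===== PRECONDITION & SPEC =====
def Spec_has_frequency_counts (input : String) (num_occurance : Int) (out : Int) : Prop := out = has_frequency_counts_alt input num_occurance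
instance (input : String) (num_occurance : Int) (out : Int) : Decidable (Spec_has_frequency_counts input num_occurance out) := by unfold Spec_has_frequency_counts; infer_instance

-- ===== CLAIM (what is proved, stated in full; the proofs are below) =====
def Claim_equal_has_frequency_counts : Prop := ∀ (input : String) (num_occurance : Int), Dom_has_frequency_counts input num_occurance → Spec_has_frequency_counts input num_occurance (has_frequency_counts input num_occurance)

-- ===== LEMMAS AND PROOFS =====

-- A returns 1 iff some character's count equals num_occurance
lemma hfc_char (input : String) (n : Int) :
    has_frequency_counts input n =
      if input.toList.any (fun c => ((input.toList.count c : Int) == n)) then 1 else 0 := by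
  unfold has_frequency_counts
  simp only []
  rw [PySem.List.foldl_pyRange_zero_pyGetD' input.toList ' ' pvStep PySem.Dict.empty]
  have hstep : pvStep = fun d x => d.insert x (d.getD x 0 + 1) := by
    funext d x
    unfold pvStep
    by_cases h : d.contains x = true
    · simp [h]
    · have hg : d.get? x = none := by
        simp only [PySem.Dict.contains, List.any_eq_true, beq_iff_eq, Prod.exists,
          exists_and_right, exists_eq_right, not_exists, PySem.Dict.get?,
          Option.map_eq_none_iff, List.find?_eq_none, Prod.forall] at h ⊢
        intro a b hab hax
        exact h b (hax ▸ hab)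
      simp [h, PySem.Dict.getD, hg]
  rw [hstep, PySem.Dict.foldl_insert_getD_add_one_eq_counter]
  congr 1
  rw [Bool.eq_iff_iff]
  simp [PySem.Dict.values, PySem.Dict.items_counter, List.any_eq_true, PySem.Set.mem_ofList]

lemma not_mem_dropWhile_beq (c : Char) :
    ∀ (r : List Char), r.Pairwise (· ≤ ·) → (∀ x ∈ r, c ≤ x) →
      c ∉ r.dropWhile (· == c) := by
  intro r
  induction r with
  | nil => intro _ _ h; simp at h
  | cons x r' ih =>
    intro hp hle
    obtain ⟨hxr', hp'⟩ := List.pairwise_cons.1 hp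
    by_cases hx : (x == c) = true
    · rw [List.dropWhile_cons, if_pos hx]
      exact ih hp' (fun y hy => hle y (List.mem_cons_of_mem _ hy))
    · rw [List.dropWhile_cons, if_neg hx]
      intro hmem
      rcases List.mem_cons.1 hmem with h | h
      · exact hx (by simp [h])
      · have h1 : x ≤ c := hxr' c h
        have h2 : c ≤ x := hle x (List.mem_cons_self)
        exact hx (by simp [le_antisymm h1 h2])

-- on a sorted list, the run scan returns 1 iff some character's count equals n
lemma pvRunScan_char (n : Int) :
    ∀ (k : Nat) (l : List Char), l.length ≤ k → l.Pairwise (· ≤ ·) →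
      pvRunScan n l = if l.any (fun c => ((l.count c : Int) == n)) then 1 else 0 := by
  intro k
  induction k with
  | zero =>
    intro l hlen _
    have : l = [] := List.eq_nil_of_length_eq_zero (Nat.le_zero.1 hlen)
    subst this
    simp [pvRunScan]
  | succ k ih =>
    intro l hlen hp
    match l with
    | [] => simp [pvRunScan]
    | c :: rest =>
      obtain ⟨hcrest, hrestp⟩ := List.pairwise_cons.1 hp
      have hcd : c ∉ rest.dropWhile (· == c) := not_mem_dropWhile_beq c rest hrestp hcrest
      have ht : ∀ x ∈ rest.takeWhile (· == c), x = c := by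
        intro x hx
        have := List.mem_takeWhile_imp hx
        simpa using this
      have htd : rest.takeWhile (· == c) ++ rest.dropWhile (· == c) = rest :=
        List.takeWhile_append_dropWhile
      have hcount : (c :: rest).count c = 1 + (rest.takeWhile (· == c)).length := by
        have h1 : (rest.takeWhile (· == c)).count c = (rest.takeWhile (· == c)).length :=
          List.count_eq_length.2 (fun b hb => by simp [ht b hb])
        have h2 : (rest.dropWhile (· == c)).count c = 0 := List.count_eq_zero.2 hcd
        rw [List.count_cons_self]
        conv_lhs => rw [← htd]
        rw [List.count_append, h1, h2]
        omega
      have hxcount : ∀ x ∈ rest.dropWhile (· == c),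
          (c :: rest).count x = (rest.dropWhile (· == c)).count x := by
        intro x hx
        have hxc : x ≠ c := fun h => hcd (h ▸ hx)
        have h0 : (rest.takeWhile (· == c)).count x = 0 :=
          List.count_eq_zero.2 (fun hmem => hxc (ht x hmem))
        rw [List.count_cons, if_neg (by simpa using (Ne.symm hxc)), Nat.add_zero]
        conv_lhs => rw [← htd]
        rw [List.count_append, h0]
        omega
      rw [pvRunScan]
      by_cases hif : ((1 + (rest.takeWhile (· == c)).length : Nat) : Int) = n
      · rw [if_pos hif]
        have : (c :: rest).any (fun x => (((c :: rest).count x : Int) == n)) = true := by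
          simp only [List.any_eq_true, beq_iff_eq]
          exact ⟨c, List.mem_cons_self, by rw [hcount]; exact_mod_cast hif⟩
        rw [if_pos this]
      · rw [if_neg hif]
        have hdp : (rest.dropWhile (· == c)).Pairwise (· ≤ ·) :=
          hrestp.sublist (List.dropWhile_sublist _)
        have hdl : (rest.dropWhile (· == c)).length ≤ k := by
          have := List.length_dropWhile_le (· == c) rest
          simp at hlen
          omega
        rw [ih _ hdl hdp]
        have hany : (c :: rest).any (fun x => (((c :: rest).count x : Int) == n)) =
            (rest.dropWhile (· == c)).any
              (fun x => (((rest.dropWhile (· == c)).count x : Int) == n)) := by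
          rw [Bool.eq_iff_iff]
          simp only [List.any_eq_true, beq_iff_eq]
          constructor
          · rintro ⟨x, hx, hxn⟩
            have hxd : x ∈ rest.dropWhile (· == c) := by
              rcases List.mem_cons.1 hx with h | h
              · exact absurd hxn (by rw [h, hcount]; exact_mod_cast hif)
              · rw [← htd] at h
                rcases List.mem_append.1 h with h | h
                · exact absurd hxn (by rw [ht x h, hcount]; exact_mod_cast hif)
                · exact h
            exact ⟨x, hxd, by rw [← hxcount x hxd]; exact hxn⟩
          · rintro ⟨x, hx, hxn⟩
            refine ⟨x, ?_, by rw [hxcount x hx]; exact hxn⟩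
            exact List.mem_cons_of_mem _ (htd ▸ List.mem_append_right _ hx)
        rw [hany]

-- ===== VERDICT (by name: the statement is the Claim_ definition above) =====
theorem has_frequency_counts_spec : Claim_equal_has_frequency_counts := by
  intro input n _
  unfold Spec_has_frequency_counts has_frequency_counts_alt
  rw [hfc_char,
    pvRunScan_char n (PySem.List.sorted input.toList (fun x => x) false).length _ le_rfl
      (PySem.List.sorted_pairwise input.toList (fun x => x))]
  have hperm := PySem.List.sorted_perm input.toList (fun x => x) false
  have hb : (PySem.List.sorted input.toList (fun x => x) false).any
        (fun c => (((PySem.List.sorted input.toList (fun x => x) false).count c : Int) == n))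
      = input.toList.any (fun c => ((input.toList.count c : Int) == n)) := by
    rw [Bool.eq_iff_iff]
    simp only [List.any_eq_true, beq_iff_eq]
    constructor
    · rintro ⟨c, hc, h⟩
      exact ⟨c, hperm.mem_iff.1 hc, by rw [← hperm.count_eq]; exact h⟩
    · rintro ⟨c, hc, h⟩
      exact ⟨c, hperm.mem_iff.2 hc, by rw [hperm.count_eq]; exact h⟩
  rw [hb]
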